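-- pv_equiv track=rewrite | github.com/iberdiev/coding_for_fun | Rummy card game implementation/question2-final.py | comp10001huxxy_score
-- ===== SOURCE A (Python) =====
-- def comp10001huxxy_score(cards):
--     """
--     This function takes a single argument in the format of a list consisting
--     of two letter strings and takes the first element of each string, which
--     corresponds to a value and adds up the values to indicate a score for the
--     combined cards
--     """
--
--     # Dictionary assigning the values of each card
--     my_dict = {'A': 1, '2': 2, '3': 3, '4': 4, '5': 5, '6': 6, '7': 7, '8': 8,
--                '9': 9, '0': 10, 'J': 11, 'Q': 12, 'K': 13}
--
--     counter = 0
--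
--     # Case of empty list, the function should return 0
--     if cards == []:
--         return 0
--
--     # Selecting the first element of each two letter string in the cards list
--     # and finding their corresponding values in my_dict. Counter is the score
--     # for the combined cards
--     for i in range(len(cards)):
--         key = cards[i][0]
--         value = my_dict[key]
--         counter += value
--
--     return counter
-- ===== SOURCE B (Python) =====
-- def comp10001huxxy_score(cards):
--     my_dict = {'A': 1, '2': 2, '3': 3, '4': 4, '5': 5, '6': 6, '7': 7, '8': 8,
--                '9': 9, '0': 10, 'J': 11, 'Q': 12, 'K': 13}
--     # Histogram of first characters, then one weighted sum over distinct ranks.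
--     counts = {}
--     for card in cards:
--         rank = card[0]
--         counts[rank] = counts.get(rank, 0) + 1
--     return sum(my_dict[rank] * n for rank, n in counts.items())
-- ===== Notes on version B (the rewrite author's own statement) =====
-- stated objective: alternative
-- what changed: B builds a frequency histogram of first characters in one pass and computes the score as a weighted sum over the distinct ranks, instead of A's index loop adding a dict lookup per card.
import Mathlib
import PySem

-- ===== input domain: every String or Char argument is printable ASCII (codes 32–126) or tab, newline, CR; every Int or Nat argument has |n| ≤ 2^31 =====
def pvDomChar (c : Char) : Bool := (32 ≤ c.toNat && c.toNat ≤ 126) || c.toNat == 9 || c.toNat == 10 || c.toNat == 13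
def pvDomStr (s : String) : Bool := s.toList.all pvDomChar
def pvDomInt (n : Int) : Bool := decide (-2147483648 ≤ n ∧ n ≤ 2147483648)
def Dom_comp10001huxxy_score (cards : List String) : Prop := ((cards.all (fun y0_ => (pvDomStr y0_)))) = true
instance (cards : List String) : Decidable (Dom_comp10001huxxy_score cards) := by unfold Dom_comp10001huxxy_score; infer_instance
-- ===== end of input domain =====

-- B replaces A's per-card index loop by a first-character histogram plus a weighted sum
-- over distinct ranks (alternative decomposition, same cost).


-- ===== PORT A =====
-- my_dict, the shared card-value table (identical literal in both Pythons)
def cardValues : PySem.Dict Char Int :=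
  PySem.Dict.ofList [('A',1),('2',2),('3',3),('4',4),('5',5),('6',6),('7',7),('8',8),
                     ('9',9),('0',10),('J',11),('Q',12),('K',13)]

def comp10001huxxy_score (cards : List String) : Int :=
  if cards = [] then 0
  else
    (PySem.List.pyRange 0 (cards.length : Int) 1).foldl
      (fun counter i =>
        -- key = cards[i][0]; Pre_ guarantees the string is nonempty (else Python IndexError)
        let key := (PySem.List.pyGetD cards i "").toList.headD ' '
        -- value = my_dict[key]; Pre_ guarantees the key is present (else Python KeyError)
        let value := (cardValues.get? key).getD 0
        counter + value) 0

-- ===== PORT B =====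
def comp10001huxxy_score_alt (cards : List String) : Int :=
  let counts := cards.foldl
    (fun (d : PySem.Dict Char Int) card =>
      -- rank = card[0]; Pre_ guarantees the string is nonempty
      let rank := card.toList.headD ' '
      d.insert rank (d.getD rank 0 + 1)) PySem.Dict.empty
  -- sum(my_dict[rank] * n for rank, n in counts.items()); Pre_ guarantees each rank is a key
  (counts.items.map (fun p => (cardValues.get? p.1).getD 0 * p.2)).sum

-- ===== PRECONDITION & SPEC =====
-- Pre_ excludes exactly the inputs on which the Python raises: a card that is the empty
-- string (IndexError on card[0]) or whose first character is not a key of my_dict (KeyError).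
def Pre_comp10001huxxy_score (cards : List String) : Prop :=
  ∀ s ∈ cards, s.toList ≠ [] ∧
    s.toList.headD ' ' ∈ (['A','2','3','4','5','6','7','8','9','0','J','Q','K'] : List Char)
instance (cards : List String) : Decidable (Pre_comp10001huxxy_score cards) := by
  unfold Pre_comp10001huxxy_score; infer_instance
def pvWitness_comp10001huxxy_score : List String := ["AH", "0D", "KC"]

def Spec_comp10001huxxy_score (cards : List String) (out : Int) : Prop := out = comp10001huxxy_score_alt cards
instance (cards : List String) (out : Int) : Decidable (Spec_comp10001huxxy_score cards out) := by unfold Spec_comp10001huxxy_score; infer_instance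

-- ===== CLAIM (what is proved, stated in full; the proofs are below) =====
def Claim_equal_comp10001huxxy_score : Prop := ∀ (cards : List String), Dom_comp10001huxxy_score cards → Pre_comp10001huxxy_score cards → Spec_comp10001huxxy_score cards (comp10001huxxy_score cards)

-- ===== LEMMAS AND PROOFS =====

-- a 0-elsewhere sum over a Nodup list containing x picks out the value at x
lemma pv_sum_ite_single (g : Char → Int) (x : Char) (s : List Char)
    (hs : s.Nodup) (hx : x ∈ s) :
    (s.map (fun k => if k = x then g k else 0)).sum = g x := by
  induction s with
  | nil => cases hx
  | cons a s ih =>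
    rcases List.nodup_cons.mp hs with ⟨ha, hs'⟩
    rcases List.mem_cons.mp hx with h | hx'
    · subst h
      have hz : (s.map (fun k => if k = x then g k else 0)).sum = 0 := by
        apply List.sum_eq_zero
        intro v hv
        rcases List.mem_map.mp hv with ⟨k, hk, rfl⟩
        have : k ≠ x := fun h => ha (h ▸ hk)
        simp [this]
      simp [hz]
    · have hax : a ≠ x := fun h => ha (h ▸ hx')
      simp only [List.map_cons, List.sum_cons, if_neg hax, zero_add]
      exact ih hs' hx'

-- the histogram identity: summing g over xs equals summing g·count over any Nodup
-- superset of xs's elements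
lemma pv_hist_sum (g : Char → Int) (xs s : List Char)
    (hs : s.Nodup) (hsub : ∀ y ∈ xs, y ∈ s) :
    (s.map (fun k => g k * (xs.count k : Int))).sum = (xs.map g).sum := by
  induction xs with
  | nil => simp
  | cons x xs ih =>
    have hsub' : ∀ y ∈ xs, y ∈ s := fun y hy => hsub y (List.mem_cons_of_mem _ hy)
    have hx : x ∈ s := hsub x List.mem_cons_self
    have hsplit : (s.map (fun k => g k * ((x :: xs).count k : Int))).sum
        = (s.map (fun k => g k * (xs.count k : Int))).sum
          + (s.map (fun k => if k = x then g k else 0)).sum := by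
      rw [← List.sum_map_add]
      apply congrArg
      apply List.map_congr_left
      intro k _
      by_cases h : k = x
      · subst h; simp; ring
      · have h' : ¬ x = k := fun hh => h hh.symm
        simp [h, h']
    rw [hsplit, ih hsub', pv_sum_ite_single g x s hs hx]
    simp [add_comm]

-- A computes the plain sum of card values over the first characters
lemma pv_A_eq_sum (cards : List String) :
    comp10001huxxy_score cards
      = ((cards.map (fun c => c.toList.headD ' ')).map
          (fun k => (cardValues.get? k).getD 0)).sum := by
  have hbody : comp10001huxxy_score cards
      = if cards = [] then 0
        else (PySem.List.pyRange 0 (cards.length : Int) 1).foldl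
          (fun counter i =>
            counter + ((cardValues.get? ((PySem.List.pyGetD cards i "").toList.headD ' ')).getD 0)) 0 := rfl
  rw [hbody]
  rcases cards with _ | ⟨c, cs⟩
  · simp
  · rw [if_neg (by simp)]
    rw [PySem.List.foldl_pyRange_zero_pyGetD' (c :: cs) ""
      (fun counter card => counter + ((cardValues.get? (card.toList.headD ' ')).getD 0)) 0]
    rw [List.map_map]
    induction (c :: cs) using List.reverseRecOn with
    | nil => simp
    | append_singleton l a ih =>
        simp only [List.foldl_append, List.map_append, List.sum_append, ih]
        simp

-- B's histogram fold is PySem.Dict.counter of the first characters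
lemma pv_B_eq_hist (cards : List String) :
    comp10001huxxy_score_alt cards
      = (((PySem.Set.ofList (cards.map (fun c => c.toList.headD ' '))).map
          (fun k => ((cardValues.get? k).getD 0)
            * ((cards.map (fun c => c.toList.headD ' ')).count k : Int)))).sum := by
  unfold comp10001huxxy_score_alt
  have h1 : cards.foldl
      (fun (d : PySem.Dict Char Int) card =>
        d.insert (card.toList.headD ' ') (d.getD (card.toList.headD ' ') 0 + 1))
      PySem.Dict.empty
      = PySem.Dict.counter (cards.map (fun c => c.toList.headD ' ')) := by
    rw [← PySem.Dict.foldl_insert_getD_add_one_eq_counter, List.foldl_map]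
  simp only [h1, PySem.Dict.items_counter, List.map_map]
  rfl

-- ===== VERDICT (by name: the statement is the Claim_ definition above) =====
theorem comp10001huxxy_score_spec : Claim_equal_comp10001huxxy_score := by
  intro cards _ _
  unfold Spec_comp10001huxxy_score
  rw [pv_A_eq_sum, pv_B_eq_hist]
  exact (pv_hist_sum _ _ _ (PySem.Set.nodup_ofList _)
    (fun y hy => (PySem.Set.mem_ofList _ _).mpr hy)).symm
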